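-- pv_equiv track=rewrite | github.com/ciardileo/python_classes | exercises/competition/neps/obi2024/nivel2/simulado/colheita.py | max_fruits_collected
-- ===== SOURCE A (Python) =====
-- def max_fruits_collected(matrix):
--     n = len(matrix)
--     m = len(matrix[0])
--
--     # Initialize the dp matrix with the same dimensions as the matrix
--     dp = [[-float('inf')] * m for _ in range(n)]
--
--     # Traverse the matrix to fill the dp array
--     for i in range(n):
--         for j in range(m):
--             if i > 0:
--                 for k in range(i):
--                     dp[i][j] = max(dp[i][j], matrix[i][j] - matrix[k][j])
--             if j > 0:
--                 for l in range(j):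
--                     dp[i][j] = max(dp[i][j], matrix[i][j] - matrix[i][l])
--
--     # Find the maximum value in the dp array
--     max_fruits = -float('inf')
--     for i in range(n):
--         for j in range(m):
--             if i > 0 or j > 0:  # Ensure at least one move
--                 max_fruits = max(max_fruits, dp[i][j])
--
--     return max_fruits + 1 if max_fruits != -float('inf') else 0
--
--
--     return max_fruits + 1
-- ===== SOURCE B (Python) =====
-- def max_fruits_collected(matrix):
--     m = len(matrix[0])
--     best = None
--     # one downward scan per column: best drop = value minus running prefix minimum
--     for j in range(m):
--         mn = None
--         for row in matrix:
--             v = row[j]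
--             if mn is not None:
--                 d = v - mn
--                 if best is None or d > best:
--                     best = d
--             if mn is None or v < mn:
--                 mn = v
--     # one rightward scan per row
--     for row in matrix:
--         mn = None
--         for j in range(m):
--             v = row[j]
--             if mn is not None:
--                 d = v - mn
--                 if best is None or d > best:
--                     best = d
--             if mn is None or v < mn:
--                 mn = v
--     return best + 1 if best is not None else 0
-- ===== Notes on version B (the rewrite author's own statement) =====
-- stated objective: faster
-- what changed: Replaced the per-cell inner scans over all earlier cells in the same row/column (and the dp matrix plus a second full pass over it) by one running-prefix-minimum scan down each column and one along each row, keeping a single scalar best; O(1) work per cell.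
import Mathlib
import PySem

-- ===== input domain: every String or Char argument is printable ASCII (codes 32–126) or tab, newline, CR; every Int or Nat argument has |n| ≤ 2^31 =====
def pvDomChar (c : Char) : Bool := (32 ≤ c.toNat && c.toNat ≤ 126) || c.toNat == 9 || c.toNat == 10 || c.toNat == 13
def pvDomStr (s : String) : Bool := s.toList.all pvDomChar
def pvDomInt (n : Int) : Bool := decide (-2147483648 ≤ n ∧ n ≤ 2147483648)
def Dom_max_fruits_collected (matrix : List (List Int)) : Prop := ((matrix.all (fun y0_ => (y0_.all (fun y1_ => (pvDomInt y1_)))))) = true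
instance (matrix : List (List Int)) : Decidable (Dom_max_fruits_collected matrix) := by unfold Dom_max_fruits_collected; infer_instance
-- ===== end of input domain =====

-- B replaces A's per-cell scans over all earlier same-row/same-column cells by one
-- running-prefix-minimum scan per column and per row (objective: faster, O(n*m) vs O(n*m*(n+m))).

-- ===== PORT A =====
-- Python's float('-inf') sentinel is modelled by `none`; `pmax` is Python's `max` with it.
def pmax (a : Option Int) (v : Int) : Option Int :=
  match a with
  | none => some v
  | some b => some (max b v)

def pmaxo (a b : Option Int) : Option Int :=
  match a, b with
  | none, b => b
  | some x, none => some x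
  | some x, some y => some (max x y)

-- Literal port of A: dp is built cell by cell (immutability replaces the in-place
-- update of dp[i][j]; the cell body is the hoisted helper dpCellA below), then a
-- second guarded double loop takes the maximum. Indexing is total via getD;
-- Pre_ keeps every index in range, exactly where Python A does not raise.
def dpCellA (matrix : List (List Int)) (i j : Nat) : Option Int :=
  let d0 : Option Int := none
  let d1 := if 0 < i then
      (List.range i).foldl (fun acc k =>
        pmax acc (((matrix.getD i []).getD j 0) - ((matrix.getD k []).getD j 0))) d0
    else d0
  let d2 := if 0 < j then
      (List.range j).foldl (fun acc l =>
        pmax acc (((matrix.getD i []).getD j 0) - ((matrix.getD i []).getD l 0))) d1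
    else d1
  d2

def max_fruits_collected (matrix : List (List Int)) : Int :=
  let n := matrix.length
  let m := (matrix.getD 0 []).length
  let dp : List (List (Option Int)) :=
    (List.range n).map (fun i => (List.range m).map (fun j => dpCellA matrix i j))
  let max_fruits :=
    (List.range n).foldl (fun acc i =>
      (List.range m).foldl (fun acc2 j =>
        if 0 < i ∨ 0 < j then pmaxo acc2 ((dp.getD i []).getD j none) else acc2) acc)
      (none : Option Int)
  match max_fruits with
  | none => 0
  | some v => v + 1

-- ===== PORT B =====
-- state (mn, best): running prefix minimum of the current line, global best drop
def bstep (st : Option Int × Option Int) (v : Int) : Option Int × Option Int :=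
  let best :=
    match st.1 with
    | none => st.2
    | some mnv =>
        let d := v - mnv
        match st.2 with
        | none => some d
        | some b => if d > b then some d else some b
  let mn :=
    match st.1 with
    | none => some v
    | some mnv => if v < mnv then some v else some mnv
  (mn, best)

def max_fruits_collected_alt (matrix : List (List Int)) : Int :=
  let m := (matrix.getD 0 []).length
  let b1 :=
    (List.range m).foldl (fun best j =>
      (matrix.foldl (fun st row => bstep st (row.getD j 0)) ((none : Option Int), best)).2)
      (none : Option Int)
  let b2 :=
    matrix.foldl (fun best row =>
      ((List.range m).foldl (fun st j => bstep st (row.getD j 0)) ((none : Option Int), best)).2)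
      b1
  match b2 with
  | none => 0
  | some b => b + 1

-- ===== PRECONDITION & SPEC =====
-- Pre_ excludes exactly the inputs where Python A raises IndexError: the empty matrix
-- (matrix[0]) and matrices whose later rows are shorter than the first row.
def Pre_max_fruits_collected (matrix : List (List Int)) : Prop :=
  matrix ≠ [] ∧ ∀ row ∈ matrix, (matrix.getD 0 []).length ≤ row.length
instance (matrix : List (List Int)) : Decidable (Pre_max_fruits_collected matrix) := by
  unfold Pre_max_fruits_collected; infer_instance

def pvWitness_max_fruits_collected : List (List Int) := [[1, 2], [0, 5]]

def Spec_max_fruits_collected (matrix : List (List Int)) (out : Int) : Prop := out = max_fruits_collected_alt matrix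
instance (matrix : List (List Int)) (out : Int) : Decidable (Spec_max_fruits_collected matrix out) := by unfold Spec_max_fruits_collected; infer_instance

-- ===== CLAIM (what is proved, stated in full; the proofs are below) =====
def Claim_equal_max_fruits_collected : Prop := ∀ (matrix : List (List Int)), Dom_max_fruits_collected matrix → Pre_max_fruits_collected matrix → Spec_max_fruits_collected matrix (max_fruits_collected matrix)

-- ===== LEMMAS AND PROOFS =====

theorem pmaxo_none_left (a : Option Int) : pmaxo none a = a := by cases a <;> rfl
theorem pmaxo_none_right (a : Option Int) : pmaxo a none = a := by cases a <;> rfl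
theorem pmaxo_assoc (a b c : Option Int) : pmaxo (pmaxo a b) c = pmaxo a (pmaxo b c) := by
  cases a <;> cases b <;> cases c <;> simp [pmaxo, max_assoc]
theorem pmaxo_comm (a b : Option Int) : pmaxo a b = pmaxo b a := by
  cases a <;> cases b <;> simp [pmaxo, max_comm]
theorem pmaxo_left_comm (a b c : Option Int) : pmaxo a (pmaxo b c) = pmaxo b (pmaxo a c) := by
  rw [← pmaxo_assoc, pmaxo_comm a b, pmaxo_assoc]

def lsup {α : Type} (l : List α) (g : α → Option Int) : Option Int :=
  l.foldl (fun a x => pmaxo a (g x)) none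

def osup (t : Nat) (f : Nat → Option Int) : Option Int := lsup (List.range t) f

theorem foldl_pmaxo_start {α : Type} (l : List α) (g : α → Option Int) (a : Option Int) :
    l.foldl (fun acc x => pmaxo acc (g x)) a = pmaxo a (lsup l g) := by
  induction l generalizing a with
  | nil => simp [lsup, pmaxo_none_right]
  | cons x t ih =>
      simp only [lsup, List.foldl_cons] at *
      rw [ih, ih (pmaxo none (g x)), pmaxo_none_left, pmaxo_assoc]

theorem lsup_cons {α : Type} (x : α) (l : List α) (g : α → Option Int) :
    lsup (x :: l) g = pmaxo (g x) (lsup l g) := by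
  simp only [lsup, List.foldl_cons]
  rw [foldl_pmaxo_start, pmaxo_none_left]; rfl

theorem lsup_map {α β : Type} (l : List α) (h : α → β) (g : β → Option Int) :
    lsup (l.map h) g = lsup l (fun x => g (h x)) := by
  simp [lsup, List.foldl_map]

theorem osup_succ (t : Nat) (f : Nat → Option Int) :
    osup (t + 1) f = pmaxo (osup t f) (f t) := by
  simp only [osup, lsup, List.range_succ, List.foldl_append, List.foldl_cons, List.foldl_nil]

theorem osup_succ' (t : Nat) (f : Nat → Option Int) :
    osup (t + 1) f = pmaxo (f 0) (osup t (fun i => f (i + 1))) := by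
  rw [osup, List.range_succ_eq_map, lsup_cons, lsup_map]
  rfl

theorem osup_congr {t : Nat} {f g : Nat → Option Int} (h : ∀ i, i < t → f i = g i) :
    osup t f = osup t g := by
  induction t with
  | zero => rfl
  | succ t ih =>
      rw [osup_succ, osup_succ, ih (fun i hi => h i (Nat.lt_succ_of_lt hi)), h t (Nat.lt_succ_self t)]

theorem osup_none (t : Nat) : osup t (fun _ => none) = none := by
  induction t with
  | zero => rfl
  | succ t ih => rw [osup_succ, ih]; rfl

theorem osup_distrib (t : Nat) (f g : Nat → Option Int) :
    osup t (fun i => pmaxo (f i) (g i)) = pmaxo (osup t f) (osup t g) := by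
  induction t with
  | zero => rfl
  | succ t ih =>
      rw [osup_succ, osup_succ, osup_succ, ih]
      simp only [pmaxo_assoc]
      rw [pmaxo_left_comm (osup t g) (f t) (g t)]

theorem osup_comm (n m : Nat) (g : Nat → Nat → Option Int) :
    osup n (fun i => osup m (fun j => g i j)) = osup m (fun j => osup n (fun i => g i j)) := by
  induction n with
  | zero => exact (osup_none m).symm
  | succ n ih =>
      rw [osup_succ, ih, ← osup_distrib]
      exact osup_congr (fun j _ => (osup_succ n (fun i => g i j)).symm)


theorem getD_map_lt {α β : Type} (l : List α) (f : α → β) (i : Nat) (d : β) (e : α)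
    (h : i < l.length) : (l.map f).getD i d = f (l.getD i e) := by
  simp [List.getD_eq_getElem?_getD, List.getElem?_map, List.getElem?_eq_getElem h]

theorem range_getD_lt (t i d : Nat) (h : i < t) : (List.range t).getD i d = i := by
  simp [List.getD_eq_getElem?_getD, h]

theorem lsup_eq_osup {α : Type} (l : List α) (g : α → Option Int) (d : α) :
    lsup l g = osup l.length (fun i => g (l.getD i d)) := by
  induction l with
  | nil => rfl
  | cons x t ih =>
      rw [lsup_cons, ih, List.length_cons, osup_succ']
      simp only [List.getD_cons_zero, List.getD_cons_succ]

theorem pmax_eq (a : Option Int) (v : Int) : pmax a v = pmaxo a (some v) := by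
  cases a <;> rfl

-- prefix-minimum update and drop candidate (proof-level views of bstep's two branches)
def minU (mn : Option Int) (v : Int) : Option Int :=
  match mn with
  | none => some v
  | some x => some (min x v)

def cand (mn : Option Int) (v : Int) : Option Int := mn.map (fun x => v - x)

theorem bstep_eq (mn b : Option Int) (v : Int) :
    bstep (mn, b) v = (minU mn v, pmaxo b (cand mn v)) := by
  cases mn <;> cases b <;>
    simp only [bstep, minU, cand, pmaxo, Option.map, min_def, max_def] <;>
    refine Prod.ext ?_ ?_ <;> dsimp only <;> split_ifs <;>
    first | rfl | (congr 1; omega)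

-- the best drop found by one scan, given the prefix minimum so far
def Dv : Option Int → List Int → Option Int
  | _, [] => none
  | mn, v :: t => pmaxo (cand mn v) (Dv (minU mn v) t)

theorem foldl_bstep (xs : List Int) (mn b : Option Int) :
    (xs.foldl bstep (mn, b)).2 = pmaxo b (Dv mn xs) := by
  induction xs generalizing mn b with
  | nil => simp [Dv, pmaxo_none_right]
  | cons v t ih =>
      simp only [List.foldl_cons, bstep_eq, Dv]
      rw [ih, pmaxo_assoc]

theorem cand_minU (mn : Option Int) (v w : Int) :
    cand (minU mn v) w = pmaxo (cand mn w) (some (w - v)) := by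
  cases mn with
  | none => rfl
  | some x =>
      simp only [cand, minU, pmaxo, Option.map, min_def, max_def]
      split_ifs <;> first | rfl | (congr 1; omega)

theorem Dv_char (xs : List Int) (mn : Option Int) :
    Dv mn xs = osup xs.length (fun i =>
      pmaxo (cand mn (xs.getD i 0)) (osup i (fun k => some (xs.getD i 0 - xs.getD k 0)))) := by
  induction xs generalizing mn with
  | nil => rfl
  | cons v t ih =>
      rw [Dv, ih, List.length_cons, osup_succ']
      congr 1
      · exact (pmaxo_none_right _).symm
      · refine osup_congr (fun i _ => ?_)
        simp only [List.getD_cons_zero, List.getD_cons_succ, cand_minU, osup_succ']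
        rw [pmaxo_assoc, pmaxo_left_comm]

-- matrix entry accessor shared by the reductions of both ports
def ment (matrix : List (List Int)) (i j : Nat) : Int := (matrix.getD i []).getD j 0

-- the common normal form: best column drop ⊔ best row drop
def core (matrix : List (List Int)) : Option Int :=
  pmaxo
    (osup (matrix.getD 0 []).length (fun j => osup matrix.length (fun i =>
      osup i (fun k => some (ment matrix i j - ment matrix k j)))))
    (osup matrix.length (fun i => osup (matrix.getD 0 []).length (fun j =>
      osup j (fun l => some (ment matrix i j - ment matrix i l)))))

def finish (o : Option Int) : Int :=
  match o with
  | none => 0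
  | some v => v + 1

theorem foldl_range_congr {β : Type} (t : Nat) (F G : β → Nat → β) (a : β)
    (h : ∀ acc i, i < t → F acc i = G acc i) :
    (List.range t).foldl F a = (List.range t).foldl G a := by
  induction t generalizing a with
  | zero => rfl
  | succ t ih =>
      simp only [List.range_succ, List.foldl_append, List.foldl_cons, List.foldl_nil]
      rw [ih _ (fun acc i hi => h acc i (Nat.lt_succ_of_lt hi)),
        h _ t (Nat.lt_succ_self t)]

theorem dpCellA_eq (matrix : List (List Int)) (i j : Nat) :
    dpCellA matrix i j
      = pmaxo (osup i (fun k => some (ment matrix i j - ment matrix k j)))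
              (osup j (fun l => some (ment matrix i j - ment matrix i l))) := by
  unfold dpCellA
  simp only [pmax_eq, ment]
  have h1 : (if 0 < i then
      (List.range i).foldl (fun acc k =>
        pmaxo acc (some (((matrix.getD i []).getD j 0) - ((matrix.getD k []).getD j 0))))
        (none : Option Int)
    else none)
      = osup i (fun k => some ((matrix.getD i []).getD j 0 - (matrix.getD k []).getD j 0)) := by
    rcases Nat.eq_zero_or_pos i with hi | hi
    · subst hi; rfl
    · rw [if_pos hi]; rfl
  rw [h1]
  rcases Nat.eq_zero_or_pos j with hj | hj
  · subst hj
    rw [if_neg (by omega)]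
    exact (pmaxo_none_right _).symm
  · rw [if_pos hj, foldl_pmaxo_start]
    rfl

theorem A_eq_core (matrix : List (List Int)) :
    max_fruits_collected matrix = finish (core matrix) := by
  unfold max_fruits_collected
  dsimp only
  have hmf : (List.range matrix.length).foldl (fun acc i =>
      (List.range ((matrix.getD 0 []).length)).foldl (fun acc2 j =>
        if 0 < i ∨ 0 < j then
          pmaxo acc2 ((((List.range matrix.length).map (fun i =>
            (List.range ((matrix.getD 0 []).length)).map (fun j =>
              dpCellA matrix i j))).getD i []).getD j none)
        else acc2) acc) (none : Option Int)
      = core matrix := by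
    rw [foldl_range_congr matrix.length _ (fun acc i =>
        pmaxo acc (osup ((matrix.getD 0 []).length) (fun j =>
          pmaxo (osup i (fun k => some (ment matrix i j - ment matrix k j)))
                (osup j (fun l => some (ment matrix i j - ment matrix i l)))))) none ?_]
    · -- the remaining fold is osup n of the cell values; split and swap
      have hfold : (List.range matrix.length).foldl (fun acc i =>
          pmaxo acc (osup ((matrix.getD 0 []).length) (fun j =>
            pmaxo (osup i (fun k => some (ment matrix i j - ment matrix k j)))
                  (osup j (fun l => some (ment matrix i j - ment matrix i l)))))) none
          = osup matrix.length (fun i => osup ((matrix.getD 0 []).length) (fun j =>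
              pmaxo (osup i (fun k => some (ment matrix i j - ment matrix k j)))
                    (osup j (fun l => some (ment matrix i j - ment matrix i l))))) := rfl
      rw [hfold]
      calc osup matrix.length (fun i => osup ((matrix.getD 0 []).length) (fun j =>
              pmaxo (osup i (fun k => some (ment matrix i j - ment matrix k j)))
                    (osup j (fun l => some (ment matrix i j - ment matrix i l)))))
          = pmaxo
              (osup matrix.length (fun i => osup ((matrix.getD 0 []).length) (fun j =>
                osup i (fun k => some (ment matrix i j - ment matrix k j)))))
              (osup matrix.length (fun i => osup ((matrix.getD 0 []).length) (fun j =>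
                osup j (fun l => some (ment matrix i j - ment matrix i l))))) := by
            rw [← osup_distrib]
            exact osup_congr (fun i _ => osup_distrib _ _ _)
        _ = core matrix := by
            rw [osup_comm matrix.length ((matrix.getD 0 []).length)
              (fun i j => osup i (fun k => some (ment matrix i j - ment matrix k j)))]
            rfl
    · intro acc i hi
      rw [foldl_range_congr ((matrix.getD 0 []).length) _ (fun acc2 j =>
          pmaxo acc2 (pmaxo (osup i (fun k => some (ment matrix i j - ment matrix k j)))
                            (osup j (fun l => some (ment matrix i j - ment matrix i l))))) acc ?_,
        foldl_pmaxo_start]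
      · rfl
      · intro acc2 j hj
        have hl : (((List.range matrix.length).map (fun i =>
            (List.range ((matrix.getD 0 []).length)).map (fun j =>
              dpCellA matrix i j))).getD i []).getD j none = dpCellA matrix i j := by
          rw [getD_map_lt _ _ _ _ 0 (by simpa using hi), range_getD_lt _ _ _ hi,
            getD_map_lt _ _ _ _ 0 (by simpa using hj), range_getD_lt _ _ _ hj]
        rw [hl, dpCellA_eq]
        by_cases hg : 0 < i ∨ 0 < j
        · rw [if_pos hg]
        · rw [if_neg hg]
          push Not at hg
          obtain ⟨h1, h2⟩ := hg
          have hi0 : i = 0 := by omega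
          have hj0 : j = 0 := by omega
          subst hi0; subst hj0
          exact (pmaxo_none_right acc2).symm
  rw [hmf]
  rfl

theorem B_eq_core (matrix : List (List Int)) :
    max_fruits_collected_alt matrix = finish (core matrix) := by
  have hcol : ∀ (best : Option Int) (j : Nat),
      (matrix.foldl (fun st row => bstep st (row.getD j 0)) ((none : Option Int), best)).2
      = pmaxo best (osup matrix.length (fun i =>
          osup i (fun k => some (ment matrix i j - ment matrix k j)))) := by
    intro best j
    rw [← List.foldl_map, foldl_bstep, Dv_char, List.length_map]
    congr 1
    refine osup_congr (fun i hi => ?_)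
    rw [getD_map_lt _ _ _ _ [] hi,
      show cand none ((matrix.getD i []).getD j 0) = none from rfl, pmaxo_none_left]
    refine osup_congr (fun k hk => ?_)
    rw [getD_map_lt _ _ _ _ [] (lt_trans hk hi)]
    rfl
  have hfun1 : (fun (best : Option Int) (j : Nat) =>
        (matrix.foldl (fun st row => bstep st (row.getD j 0)) ((none : Option Int), best)).2)
      = fun best j => pmaxo best (osup matrix.length (fun i =>
          osup i (fun k => some (ment matrix i j - ment matrix k j)))) :=
    funext fun best => funext fun j => hcol best j
  have hH : ∀ row : List Int,
      Dv none ((List.range ((matrix.getD 0 []).length)).map (fun j => row.getD j 0))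
      = osup ((matrix.getD 0 []).length) (fun j =>
          osup j (fun l => some (row.getD j 0 - row.getD l 0))) := by
    intro row
    rw [Dv_char, List.length_map, List.length_range]
    refine osup_congr (fun j hj => ?_)
    rw [getD_map_lt _ _ _ _ 0 (by simpa using hj), range_getD_lt _ _ _ hj,
      show cand none (row.getD j 0) = none from rfl, pmaxo_none_left]
    refine osup_congr (fun l hl => ?_)
    rw [getD_map_lt _ _ _ _ 0 (by simpa using lt_trans hl hj), range_getD_lt _ _ _ (lt_trans hl hj)]
  have hfun2 : (fun (best : Option Int) (row : List Int) =>
        ((List.range ((matrix.getD 0 []).length)).foldl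
          (fun st j => bstep st (row.getD j 0)) ((none : Option Int), best)).2)
      = fun best row => pmaxo best (osup ((matrix.getD 0 []).length) (fun j =>
          osup j (fun l => some (row.getD j 0 - row.getD l 0)))) := by
    refine funext fun best => funext fun row => ?_
    rw [← List.foldl_map, foldl_bstep, hH]
  unfold max_fruits_collected_alt
  dsimp only
  rw [hfun1, hfun2]
  have hb1 : (List.range ((matrix.getD 0 []).length)).foldl
      (fun best j => pmaxo best (osup matrix.length (fun i =>
          osup i (fun k => some (ment matrix i j - ment matrix k j))))) none
      = osup ((matrix.getD 0 []).length) (fun j => osup matrix.length (fun i =>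
          osup i (fun k => some (ment matrix i j - ment matrix k j)))) := rfl
  rw [hb1, foldl_pmaxo_start,
    lsup_eq_osup matrix (fun row => osup ((matrix.getD 0 []).length) (fun j =>
      osup j (fun l => some (row.getD j 0 - row.getD l 0)))) []]
  rfl

-- ===== VERDICT (by name: the statement is the Claim_ definition above) =====
theorem max_fruits_collected_spec : Claim_equal_max_fruits_collected := by
  intro matrix _ _
  unfold Spec_max_fruits_collected
  rw [A_eq_core, B_eq_core]
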